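-- pv_equiv track=rewrite | github.com/Nishant-hub-9977/CleanFilesBackend | recruitai-backend-clean/app/services/offline_matching.py | generate_candidate_summary
-- ===== SOURCE A (Python) =====
-- from typing import Dict, List, Any, Optional, Tuple
--
-- def generate_candidate_summary(skills: List[str], experience_years: int,
--                              education: List[str]) -> str:
--     """Generate a comprehensive candidate summary"""
--
--     # Determine primary skill area
--     primary_area = "Technology"
--     if any("data" in skill.lower() or "machine learning" in skill.lower()
--            for skill in skills):
--         primary_area = "Data Science"
--     elif any("web" in skill.lower() or "react" in skill.lower() or "javascript" in skill.lower()
--              for skill in skills):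
--         primary_area = "Web Development"
--     elif any("mobile" in skill.lower() or "android" in skill.lower() or "ios" in skill.lower()
--              for skill in skills):
--         primary_area = "Mobile Development"
--
--     # Build summary
--     summary_parts = []
--
--     if experience_years > 0:
--         summary_parts.append(f"{experience_years} years of experience")
--
--     if skills:
--         top_skills = skills[:3]
--         summary_parts.append(f"skilled in {', '.join(top_skills)}")
--
--     if education:
--         summary_parts.append("with relevant educational background")
--
--     if summary_parts:
--         summary = f"Candidate with {' '.join(summary_parts)} in {primary_area}."
--     else:
--         summary = f"Candidate in {primary_area} field."
--
--     return summary
-- ===== SOURCE B (Python) =====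
-- def generate_candidate_summary(skills, experience_years, education):
--     """Single pass over skills gathering area flags, then parts via a comprehension."""
--     has_data = has_web = has_mobile = False
--     for skill in skills:
--         s = skill.lower()
--         has_data = has_data or "data" in s or "machine learning" in s
--         has_web = has_web or "web" in s or "react" in s or "javascript" in s
--         has_mobile = has_mobile or "mobile" in s or "android" in s or "ios" in s
--
--     if has_data:
--         primary_area = "Data Science"
--     elif has_web:
--         primary_area = "Web Development"
--     elif has_mobile:
--         primary_area = "Mobile Development"
--     else:
--         primary_area = "Technology"
--
--     parts = [p for p in (
--         f"{experience_years} years of experience" if experience_years > 0 else None,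
--         "skilled in " + ", ".join(skills[:3]) if skills else None,
--         "with relevant educational background" if education else None,
--     ) if p is not None]
--
--     if parts:
--         return f"Candidate with {' '.join(parts)} in {primary_area}."
--     return f"Candidate in {primary_area} field."
-- ===== Notes on version B (the rewrite author's own statement) =====
-- stated objective: faster
-- what changed: Replaces the three short-circuiting any() scans over skills with one flag-gathering pass that lowercases each skill once, and builds the summary parts with a filtering comprehension over three optional pieces instead of sequential conditional appends.
import Mathlib
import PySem

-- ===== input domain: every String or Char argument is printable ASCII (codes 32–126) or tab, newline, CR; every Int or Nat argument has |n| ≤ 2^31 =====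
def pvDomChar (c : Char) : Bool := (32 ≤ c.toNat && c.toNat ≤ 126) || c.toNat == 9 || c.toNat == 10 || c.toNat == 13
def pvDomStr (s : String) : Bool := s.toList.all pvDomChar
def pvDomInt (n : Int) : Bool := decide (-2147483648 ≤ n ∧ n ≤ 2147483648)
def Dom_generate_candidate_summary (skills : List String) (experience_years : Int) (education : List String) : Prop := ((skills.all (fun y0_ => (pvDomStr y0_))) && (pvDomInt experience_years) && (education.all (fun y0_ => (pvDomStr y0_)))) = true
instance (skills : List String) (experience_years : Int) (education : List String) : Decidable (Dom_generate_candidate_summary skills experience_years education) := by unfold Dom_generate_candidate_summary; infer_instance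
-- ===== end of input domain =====

-- B makes one flag-gathering pass over skills (lowercasing each skill once) instead of three any() scans,
-- and builds the summary parts by filtering three optional pieces instead of sequential conditional appends.

-- ===== PORT A =====
def generate_candidate_summary (skills : List String) (experience_years : Int) (education : List String) : String :=
  let primary_area :=
    if skills.any (fun skill => PySem.Str.isIn "data" (PySem.Str.lower skill) || PySem.Str.isIn "machine learning" (PySem.Str.lower skill)) then
      "Data Science"
    else if skills.any (fun skill => PySem.Str.isIn "web" (PySem.Str.lower skill) || PySem.Str.isIn "react" (PySem.Str.lower skill) || PySem.Str.isIn "javascript" (PySem.Str.lower skill)) then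
      "Web Development"
    else if skills.any (fun skill => PySem.Str.isIn "mobile" (PySem.Str.lower skill) || PySem.Str.isIn "android" (PySem.Str.lower skill) || PySem.Str.isIn "ios" (PySem.Str.lower skill)) then
      "Mobile Development"
    else "Technology"
  let summary_parts : List String := []
  let summary_parts := if experience_years > 0 then summary_parts ++ [PySem.Int.toStr experience_years ++ " years of experience"] else summary_parts
  let summary_parts := if skills ≠ [] then summary_parts ++ ["skilled in " ++ PySem.Str.join ", " (PySem.List.slice skills none (some 3))] else summary_parts
  let summary_parts := if education ≠ [] then summary_parts ++ ["with relevant educational background"] else summary_parts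
  if summary_parts ≠ [] then
    "Candidate with " ++ PySem.Str.join " " summary_parts ++ " in " ++ primary_area ++ "."
  else
    "Candidate in " ++ primary_area ++ " field."

-- ===== PORT B =====
def generate_candidate_summary_alt (skills : List String) (experience_years : Int) (education : List String) : String :=
  let flags := skills.foldl (fun (f : Bool × Bool × Bool) skill =>
      let s := PySem.Str.lower skill
      (f.1 || PySem.Str.isIn "data" s || PySem.Str.isIn "machine learning" s,
       f.2.1 || PySem.Str.isIn "web" s || PySem.Str.isIn "react" s || PySem.Str.isIn "javascript" s,
       f.2.2 || PySem.Str.isIn "mobile" s || PySem.Str.isIn "android" s || PySem.Str.isIn "ios" s)) (false, false, false)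
  let primary_area :=
    if flags.1 then "Data Science"
    else if flags.2.1 then "Web Development"
    else if flags.2.2 then "Mobile Development"
    else "Technology"
  let parts : List String :=
    ([if experience_years > 0 then some (PySem.Int.toStr experience_years ++ " years of experience") else none,
      if skills ≠ [] then some ("skilled in " ++ PySem.Str.join ", " (PySem.List.slice skills none (some 3))) else none,
      if education ≠ [] then some "with relevant educational background" else none] : List (Option String)).filterMap id
  if parts ≠ [] then
    "Candidate with " ++ PySem.Str.join " " parts ++ " in " ++ primary_area ++ "."
  else
    "Candidate in " ++ primary_area ++ " field."

-- ===== PRECONDITION & SPEC =====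
def Spec_generate_candidate_summary (skills : List String) (experience_years : Int) (education : List String) (out : String) : Prop := out = generate_candidate_summary_alt skills experience_years education
instance (skills : List String) (experience_years : Int) (education : List String) (out : String) : Decidable (Spec_generate_candidate_summary skills experience_years education out) := by unfold Spec_generate_candidate_summary; infer_instance

-- ===== CLAIM (what is proved, stated in full; the proofs are below) =====
def Claim_equal_generate_candidate_summary : Prop := ∀ (skills : List String) (experience_years : Int) (education : List String), Dom_generate_candidate_summary skills experience_years education → Spec_generate_candidate_summary skills experience_years education (generate_candidate_summary skills experience_years education)

-- ===== LEMMAS AND PROOFS =====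

theorem pv_flags_eq (l : List String) (a b c : Bool) :
    l.foldl (fun (f : Bool × Bool × Bool) skill =>
      let s := PySem.Str.lower skill
      (f.1 || PySem.Str.isIn "data" s || PySem.Str.isIn "machine learning" s,
       f.2.1 || PySem.Str.isIn "web" s || PySem.Str.isIn "react" s || PySem.Str.isIn "javascript" s,
       f.2.2 || PySem.Str.isIn "mobile" s || PySem.Str.isIn "android" s || PySem.Str.isIn "ios" s)) (a, b, c)
      = (a || l.any (fun skill => PySem.Str.isIn "data" (PySem.Str.lower skill) || PySem.Str.isIn "machine learning" (PySem.Str.lower skill)),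
         b || l.any (fun skill => PySem.Str.isIn "web" (PySem.Str.lower skill) || PySem.Str.isIn "react" (PySem.Str.lower skill) || PySem.Str.isIn "javascript" (PySem.Str.lower skill)),
         c || l.any (fun skill => PySem.Str.isIn "mobile" (PySem.Str.lower skill) || PySem.Str.isIn "android" (PySem.Str.lower skill) || PySem.Str.isIn "ios" (PySem.Str.lower skill))) := by
  induction l generalizing a b c with
  | nil => simp
  | cons x xs ih =>
      rw [List.foldl_cons, ih]
      simp [List.any_cons, Bool.or_assoc]

theorem pv_parts_eq (e : Int) (sk ed : List String) (s1 s2 s3 : String) :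
    (let p : List String := []
     let p := if e > 0 then p ++ [s1] else p
     let p := if sk ≠ [] then p ++ [s2] else p
     if ed ≠ [] then p ++ [s3] else p)
      = ([if e > 0 then some s1 else none,
          if sk ≠ [] then some s2 else none,
          if ed ≠ [] then some s3 else none] : List (Option String)).filterMap id := by
  split_ifs <;> rfl

theorem generate_candidate_summary_eq_alt (skills : List String) (experience_years : Int) (education : List String) :
    generate_candidate_summary skills experience_years education = generate_candidate_summary_alt skills experience_years education := by
  unfold generate_candidate_summary generate_candidate_summary_alt
  rw [pv_flags_eq skills false false false]
  simp only [Bool.false_or]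
  rw [pv_parts_eq experience_years skills education]

-- ===== VERDICT (by name: the statement is the Claim_ definition above) =====
theorem generate_candidate_summary_spec : Claim_equal_generate_candidate_summary := by
  intro skills e edu _
  unfold Spec_generate_candidate_summary
  exact generate_candidate_summary_eq_alt skills e edu
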